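-- pv_equiv track=rewrite | github.com/vikrant-n/prod-rag-doc | otel_config.py | _get_hierarchy_level
-- ===== SOURCE A (Python) =====
-- SERVICE_HIERARCHY = {
--     "document-rag-orchestrator": {
--         "parent": None,
--         "children": ["document-rag-api", "document-rag-backend", "process-manager"],
--         "type": "orchestrator"
--     },
--     "process-manager": {
--         "parent": "document-rag-orchestrator",
--         "children": ["backend-process-monitor", "api-process-monitor"],
--         "type": "service_manager"
--     },
--     "document-rag-backend": {
--         "parent": "document-rag-orchestrator",
--         "children": [
--             "google-drive-monitor", "local-file-scanner", "document-processor",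
--             "text-splitter", "embedding-generator", "vector-store-manager",
--             "file-fingerprint-db"
--         ],
--         "type": "processing_service"
--     },
--     "document-processor": {
--         "parent": "document-rag-backend",
--         "children": ["pdf-loader", "docx-loader", "pptx-loader", "image-processor"],
--         "type": "component"
--     },
--     "document-rag-api": {
--         "parent": "document-rag-orchestrator",
--         "children": ["query-processor", "session-manager", "response-generator", "backend-proxy"],
--         "type": "api_service"
--     },
--     # Component-level services
--     "google-drive-monitor": {"parent": "document-rag-backend", "type": "component"},
--     "local-file-scanner": {"parent": "document-rag-backend", "type": "component"},
--     "text-splitter": {"parent": "document-rag-backend", "type": "component"},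
--     "embedding-generator": {"parent": "document-rag-backend", "type": "component"},
--     "vector-store-manager": {"parent": "document-rag-backend", "type": "component"},
--     "file-fingerprint-db": {"parent": "document-rag-backend", "type": "component"},
--     "query-processor": {"parent": "document-rag-api", "type": "component"},
--     "session-manager": {"parent": "document-rag-api", "type": "component"},
--     "response-generator": {"parent": "document-rag-api", "type": "component"},
--     "backend-proxy": {"parent": "document-rag-api", "type": "component"},
--     "pdf-loader": {"parent": "document-processor", "type": "sub_component"},
--     "docx-loader": {"parent": "document-processor", "type": "sub_component"},
--     "pptx-loader": {"parent": "document-processor", "type": "sub_component"},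
--     "image-processor": {"parent": "document-processor", "type": "sub_component"},
-- }
--
-- def _get_hierarchy_level(service_name: str) -> int:
--     """Calculate hierarchy level for service mapping"""
--     level = 0
--     current = service_name
--
--     while current and current in SERVICE_HIERARCHY:
--         parent = SERVICE_HIERARCHY[current].get("parent")
--         if parent:
--             level += 1
--             current = parent
--         else:
--             break
--
--     return level
-- ===== SOURCE B (Python) =====
-- SERVICE_HIERARCHY = {
--     "document-rag-orchestrator": {"parent": None, "children": ["document-rag-api", "document-rag-backend", "process-manager"], "type": "orchestrator"},
--     "process-manager": {"parent": "document-rag-orchestrator", "children": ["backend-process-monitor", "api-process-monitor"], "type": "service_manager"},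
--     "document-rag-backend": {"parent": "document-rag-orchestrator", "children": ["google-drive-monitor", "local-file-scanner", "document-processor", "text-splitter", "embedding-generator", "vector-store-manager", "file-fingerprint-db"], "type": "processing_service"},
--     "document-processor": {"parent": "document-rag-backend", "children": ["pdf-loader", "docx-loader", "pptx-loader", "image-processor"], "type": "component"},
--     "document-rag-api": {"parent": "document-rag-orchestrator", "children": ["query-processor", "session-manager", "response-generator", "backend-proxy"], "type": "api_service"},
--     "google-drive-monitor": {"parent": "document-rag-backend", "type": "component"},
--     "local-file-scanner": {"parent": "document-rag-backend", "type": "component"},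
--     "text-splitter": {"parent": "document-rag-backend", "type": "component"},
--     "embedding-generator": {"parent": "document-rag-backend", "type": "component"},
--     "vector-store-manager": {"parent": "document-rag-backend", "type": "component"},
--     "file-fingerprint-db": {"parent": "document-rag-backend", "type": "component"},
--     "query-processor": {"parent": "document-rag-api", "type": "component"},
--     "session-manager": {"parent": "document-rag-api", "type": "component"},
--     "response-generator": {"parent": "document-rag-api", "type": "component"},
--     "backend-proxy": {"parent": "document-rag-api", "type": "component"},
--     "pdf-loader": {"parent": "document-processor", "type": "sub_component"},
--     "docx-loader": {"parent": "document-processor", "type": "sub_component"},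
--     "pptx-loader": {"parent": "document-processor", "type": "sub_component"},
--     "image-processor": {"parent": "document-processor", "type": "sub_component"},
-- }
--
--
-- def _compute_levels():
--     """Build the whole level table once: roots get 0, then resolve each
--     remaining service as soon as its parent's level is known (worklist rounds)."""
--     levels = {}
--     pending = list(SERVICE_HIERARCHY)
--     while pending:
--         remaining = []
--         for s in pending:
--             p = SERVICE_HIERARCHY[s].get("parent")
--             if not p:
--                 levels[s] = 0
--             elif p in levels:
--                 levels[s] = levels[p] + 1
--             else:
--                 remaining.append(s)
--         pending = remaining
--     return levels
--
--
-- _LEVELS = _compute_levels()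
--
--
-- def _get_hierarchy_level(service_name: str) -> int:
--     """Calculate hierarchy level for service mapping (precomputed-table lookup)."""
--     return _LEVELS.get(service_name, 0)
-- ===== Notes on version B (the rewrite author's own statement) =====
-- stated objective: alternative
-- what changed: Instead of walking the parent chain on every call, B builds the full level table once at module load (worklist fixpoint: roots get 0, each service resolves to parent's level + 1) and each call is a single dict lookup with default 0.
import Mathlib
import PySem

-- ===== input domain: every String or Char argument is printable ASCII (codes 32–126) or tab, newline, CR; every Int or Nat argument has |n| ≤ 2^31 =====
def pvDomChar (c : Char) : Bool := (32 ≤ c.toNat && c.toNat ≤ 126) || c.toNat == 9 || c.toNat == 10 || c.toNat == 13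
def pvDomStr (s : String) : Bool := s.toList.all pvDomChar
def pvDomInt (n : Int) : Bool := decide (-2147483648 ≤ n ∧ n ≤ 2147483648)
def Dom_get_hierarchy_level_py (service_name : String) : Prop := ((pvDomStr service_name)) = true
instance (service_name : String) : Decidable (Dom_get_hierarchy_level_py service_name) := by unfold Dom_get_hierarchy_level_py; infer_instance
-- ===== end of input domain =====

-- B replaces A's per-call walk up the parent chain by a level table built once
-- (worklist fixpoint over the whole hierarchy) and a single table lookup per call (different data flow; speed not claimed).

-- ===== PORT A =====
-- A reads only the "parent" field of SERVICE_HIERARCHY; this is that field as a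
-- lookup function ('none' = key absent, 'some p' = key present with parent p).
def serviceParent? (s : String) : Option (Option String) :=
  if s = "document-rag-orchestrator" then some none
  else if s = "process-manager" then some (some "document-rag-orchestrator")
  else if s = "document-rag-backend" then some (some "document-rag-orchestrator")
  else if s = "document-processor" then some (some "document-rag-backend")
  else if s = "document-rag-api" then some (some "document-rag-orchestrator")
  else if s = "google-drive-monitor" then some (some "document-rag-backend")
  else if s = "local-file-scanner" then some (some "document-rag-backend")
  else if s = "text-splitter" then some (some "document-rag-backend")
  else if s = "embedding-generator" then some (some "document-rag-backend")
  else if s = "vector-store-manager" then some (some "document-rag-backend")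
  else if s = "file-fingerprint-db" then some (some "document-rag-backend")
  else if s = "query-processor" then some (some "document-rag-api")
  else if s = "session-manager" then some (some "document-rag-api")
  else if s = "response-generator" then some (some "document-rag-api")
  else if s = "backend-proxy" then some (some "document-rag-api")
  else if s = "pdf-loader" then some (some "document-processor")
  else if s = "docx-loader" then some (some "document-processor")
  else if s = "pptx-loader" then some (some "document-processor")
  else if s = "image-processor" then some (some "document-processor")
  else none

-- A's while-loop with its level accumulator and current pointer; fuel is a
-- totality guard only (the fixed hierarchy has depth ≤ 3, so 64 never runs out).
def getHierLoopA (fuel : Nat) (level : Int) (current : String) : Int :=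
  match fuel with
  | 0 => level
  | f + 1 =>
    if current ≠ "" ∧ (serviceParent? current).isSome then
      match serviceParent? current with
      | some (some p) => if p ≠ "" then getHierLoopA f (level + 1) p else level
      | _ => level
    else level

def get_hierarchy_level_py (service_name : String) : Int :=
  getHierLoopA 64 0 service_name

-- ===== PORT B =====
-- Source B iterates over SERVICE_HIERARCHY's keys and reads each entry's "parent":
-- the dict as a PySem.Dict from key to parent field, in insertion order.
def hierParents : PySem.Dict String (Option String) := PySem.Dict.ofList
  [ ("document-rag-orchestrator", none),
    ("process-manager", some "document-rag-orchestrator"),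
    ("document-rag-backend", some "document-rag-orchestrator"),
    ("document-processor", some "document-rag-backend"),
    ("document-rag-api", some "document-rag-orchestrator"),
    ("google-drive-monitor", some "document-rag-backend"),
    ("local-file-scanner", some "document-rag-backend"),
    ("text-splitter", some "document-rag-backend"),
    ("embedding-generator", some "document-rag-backend"),
    ("vector-store-manager", some "document-rag-backend"),
    ("file-fingerprint-db", some "document-rag-backend"),
    ("query-processor", some "document-rag-api"),
    ("session-manager", some "document-rag-api"),
    ("response-generator", some "document-rag-api"),
    ("backend-proxy", some "document-rag-api"),
    ("pdf-loader", some "document-processor"),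
    ("docx-loader", some "document-processor"),
    ("pptx-loader", some "document-processor"),
    ("image-processor", some "document-processor") ]

-- one worklist round of _compute_levels: the for-loop over 'pending', threading
-- (levels, remaining) exactly as the Python does (levels is read as it grows).
def levelsRound (levels : PySem.Dict String Int) (pending : List String) :
    PySem.Dict String Int × List String :=
  pending.foldl
    (fun st s =>
      match (PySem.Dict.get? hierParents s).getD none with
      | none => (PySem.Dict.insert st.1 s 0, st.2)
      | some p =>
        match PySem.Dict.get? st.1 p with
        | some lv => (PySem.Dict.insert st.1 s (lv + 1), st.2)
        | none => (st.1, st.2 ++ [s]))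
    (levels, [])

-- the while-loop of _compute_levels; fuel is a totality guard only (each round
-- of the fixed, acyclic hierarchy resolves at least one pending key).
def buildLevels (fuel : Nat) (levels : PySem.Dict String Int) (pending : List String) :
    PySem.Dict String Int :=
  match fuel, pending with
  | _, [] => levels
  | 0, _ => levels
  | f + 1, _ =>
    let st := levelsRound levels pending
    buildLevels f st.1 st.2

-- _LEVELS = _compute_levels(), computed once at module load
def levelsTable : PySem.Dict String Int :=
  buildLevels (PySem.Dict.keys hierParents).length PySem.Dict.empty
    (PySem.Dict.keys hierParents)

def get_hierarchy_level_py_alt (service_name : String) : Int :=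
  PySem.Dict.getD levelsTable service_name 0

-- ===== PRECONDITION & SPEC =====
def Spec_get_hierarchy_level_py (service_name : String) (out : Int) : Prop := out = get_hierarchy_level_py_alt service_name
instance (service_name : String) (out : Int) : Decidable (Spec_get_hierarchy_level_py service_name out) := by unfold Spec_get_hierarchy_level_py; infer_instance

-- ===== CLAIM (what is proved, stated in full; the proofs are below) =====
def Claim_equal_get_hierarchy_level_py : Prop := ∀ (service_name : String), Dom_get_hierarchy_level_py service_name → Spec_get_hierarchy_level_py service_name (get_hierarchy_level_py service_name)

-- ===== LEMMAS AND PROOFS =====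

-- the fixpoint evaluates to this literal table (levels in hierarchy order)
theorem levelsTable_eval : levelsTable = PySem.Dict.mk
    [ ("document-rag-orchestrator", 0),
      ("process-manager", 1),
      ("document-rag-backend", 1),
      ("document-processor", 2),
      ("document-rag-api", 1),
      ("google-drive-monitor", 2),
      ("local-file-scanner", 2),
      ("text-splitter", 2),
      ("embedding-generator", 2),
      ("vector-store-manager", 2),
      ("file-fingerprint-db", 2),
      ("query-processor", 2),
      ("session-manager", 2),
      ("response-generator", 2),
      ("backend-proxy", 2),
      ("pdf-loader", 3),
      ("docx-loader", 3),
      ("pptx-loader", 3),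
      ("image-processor", 3) ] := by decide

-- Both ports return 0 on any string outside the hierarchy.
theorem eq_of_not_mem (s : String)
    (h : serviceParent? s = none) (h' : PySem.Dict.get? levelsTable s = none) :
    get_hierarchy_level_py s = get_hierarchy_level_py_alt s := by
  simp [get_hierarchy_level_py, get_hierarchy_level_py_alt, getHierLoopA, h,
        PySem.Dict.getD_eq_get?_getD, h']

-- ===== VERDICT (by name: the statement is the Claim_ definition above) =====
theorem get_hierarchy_level_py_spec : Claim_equal_get_hierarchy_level_py := by
  intro s _
  unfold Spec_get_hierarchy_level_py
  by_cases h1 : s = "document-rag-orchestrator"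
  · subst h1; decide
  by_cases h2 : s = "process-manager"
  · subst h2; decide
  by_cases h3 : s = "document-rag-backend"
  · subst h3; decide
  by_cases h4 : s = "document-processor"
  · subst h4; decide
  by_cases h5 : s = "document-rag-api"
  · subst h5; decide
  by_cases h6 : s = "google-drive-monitor"
  · subst h6; decide
  by_cases h7 : s = "local-file-scanner"
  · subst h7; decide
  by_cases h8 : s = "text-splitter"
  · subst h8; decide
  by_cases h9 : s = "embedding-generator"
  · subst h9; decide
  by_cases h10 : s = "vector-store-manager"
  · subst h10; decide
  by_cases h11 : s = "file-fingerprint-db"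
  · subst h11; decide
  by_cases h12 : s = "query-processor"
  · subst h12; decide
  by_cases h13 : s = "session-manager"
  · subst h13; decide
  by_cases h14 : s = "response-generator"
  · subst h14; decide
  by_cases h15 : s = "backend-proxy"
  · subst h15; decide
  by_cases h16 : s = "pdf-loader"
  · subst h16; decide
  by_cases h17 : s = "docx-loader"
  · subst h17; decide
  by_cases h18 : s = "pptx-loader"
  · subst h18; decide
  by_cases h19 : s = "image-processor"
  · subst h19; decide
  refine eq_of_not_mem s (by simp [serviceParent?, h1, h2, h3, h4, h5, h6, h7, h8, h9, h10, h11, h12, h13, h14, h15, h16, h17, h18, h19]) ?_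
  rw [levelsTable_eval]
  have g1 : "document-rag-orchestrator" ≠ s := fun e => h1 e.symm
  have g2 : "process-manager" ≠ s := fun e => h2 e.symm
  have g3 : "document-rag-backend" ≠ s := fun e => h3 e.symm
  have g4 : "document-processor" ≠ s := fun e => h4 e.symm
  have g5 : "document-rag-api" ≠ s := fun e => h5 e.symm
  have g6 : "google-drive-monitor" ≠ s := fun e => h6 e.symm
  have g7 : "local-file-scanner" ≠ s := fun e => h7 e.symm
  have g8 : "text-splitter" ≠ s := fun e => h8 e.symm
  have g9 : "embedding-generator" ≠ s := fun e => h9 e.symm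
  have g10 : "vector-store-manager" ≠ s := fun e => h10 e.symm
  have g11 : "file-fingerprint-db" ≠ s := fun e => h11 e.symm
  have g12 : "query-processor" ≠ s := fun e => h12 e.symm
  have g13 : "session-manager" ≠ s := fun e => h13 e.symm
  have g14 : "response-generator" ≠ s := fun e => h14 e.symm
  have g15 : "backend-proxy" ≠ s := fun e => h15 e.symm
  have g16 : "pdf-loader" ≠ s := fun e => h16 e.symm
  have g17 : "docx-loader" ≠ s := fun e => h17 e.symm
  have g18 : "pptx-loader" ≠ s := fun e => h18 e.symm
  have g19 : "image-processor" ≠ s := fun e => h19 e.symm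
  simp [PySem.Dict.get?, g1, g2, g3, g4, g5, g6, g7, g8, g9, g10, g11, g12, g13, g14, g15, g16, g17, g18, g19]
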